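-- pv_equiv track=rewrite | github.com/casangi/casagui | casagui/plot/ms_plot/_xds_plot_axes.py | _get_baseline_ant1_ticks
-- ===== SOURCE A (Python) =====
-- def _get_baseline_ant1_ticks(baseline_ticks):
--     ''' Return labels for each new ant1 name in baselines '''
--     ant1_ticks = []
--     last_ant1 = None
--     last_idx = None
--
--     # space by minimum increment to avoid overlapping tick labels
--     min_increment = max(int(len(baseline_ticks) / 50), 1)
--
--     for idx, tick in baseline_ticks:
--         ant1_name = tick.split(' & ')[0]
--         if ant1_name != last_ant1:
--             last_ant1 = ant1_name
--             if last_idx is None or ((idx - last_idx) >= min_increment):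
--                 ant1_ticks.append((idx, ant1_name))
--                 last_idx = idx
--     return ant1_ticks
-- ===== SOURCE B (Python) =====
-- def _get_baseline_ant1_ticks(baseline_ticks):
--     ''' Return labels for each new ant1 name in baselines '''
--     # pass 1: first tick of each run of equal ant1 names
--     candidates = []
--     prev = None
--     for idx, tick in baseline_ticks:
--         name = tick.split(' & ')[0]
--         if name != prev:
--             candidates.append((idx, name))
--             prev = name
--
--     # pass 2: greedy spacing by minimum increment
--     min_increment = max(int(len(baseline_ticks) / 50), 1)
--     result = []
--     last_idx = None
--     for idx, name in candidates:
--         if last_idx is None or idx - last_idx >= min_increment: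
--             result.append((idx, name))
--             last_idx = idx
--     return result
-- ===== Notes on version B (the rewrite author's own statement) =====
-- stated objective: alternative
-- what changed: A's single interleaved loop is split into two passes: one pass collecting the first tick of each run of equal ant1 names, then a separate greedy spacing pass that filters those candidates by the minimum index increment.
import Mathlib
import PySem

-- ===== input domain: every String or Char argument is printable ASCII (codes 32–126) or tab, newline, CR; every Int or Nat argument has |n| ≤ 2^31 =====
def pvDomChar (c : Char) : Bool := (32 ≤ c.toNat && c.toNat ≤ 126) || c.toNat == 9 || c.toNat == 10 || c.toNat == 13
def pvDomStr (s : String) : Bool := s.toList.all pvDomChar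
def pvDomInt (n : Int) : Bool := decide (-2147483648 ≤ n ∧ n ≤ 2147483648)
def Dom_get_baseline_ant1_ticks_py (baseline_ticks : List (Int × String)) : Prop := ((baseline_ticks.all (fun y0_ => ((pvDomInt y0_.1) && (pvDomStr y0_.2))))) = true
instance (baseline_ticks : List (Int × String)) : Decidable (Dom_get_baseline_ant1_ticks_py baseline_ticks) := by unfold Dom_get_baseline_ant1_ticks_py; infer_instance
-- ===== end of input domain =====

-- B replaces A's single interleaved loop by a boundary-detection pass followed by a greedy spacing pass (alternative decomposition, same cost).

-- tick.split(' & ')[0]; split on a nonempty separator always returns a nonempty list, so [0] = headD ""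
def pvAnt1 (t : String) : String := ((PySem.Str.split? t " & ").getD []).headD ""

-- ===== PORT A =====
-- loop body of A: state (ant1_ticks, last_ant1, last_idx)
def pvAStep (min_increment : Int)
    (st : List (Int × String) × Option String × Option Int) (p : Int × String) :
    List (Int × String) × Option String × Option Int :=
  let a := pvAnt1 p.2
  if some a ≠ st.2.1 then
    match st.2.2 with
    | none => (st.1 ++ [(p.1, a)], some a, some p.1)
    | some li =>
        if p.1 - li ≥ min_increment then (st.1 ++ [(p.1, a)], some a, some p.1)
        else (st.1, some a, some li)
  else st

def get_baseline_ant1_ticks_py (baseline_ticks : List (Int × String)) : List (Int × String) :=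
  -- int(len(...)/50) = len // 50 for this nonnegative length
  let min_increment : Int := max ((baseline_ticks.length : Int) / 50) 1
  (baseline_ticks.foldl (pvAStep min_increment) ([], none, none)).1

-- ===== PORT B =====
-- pass 1 body: state (candidates, prev)
def pvBCandStep (st : List (Int × String) × Option String) (p : Int × String) :
    List (Int × String) × Option String :=
  let name := pvAnt1 p.2
  if some name ≠ st.2 then (st.1 ++ [(p.1, name)], some name) else st

-- pass 2 body: state (result, last_idx)
def pvBSelStep (min_increment : Int)
    (st : List (Int × String) × Option Int) (p : Int × String) :
    List (Int × String) × Option Int :=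
  match st.2 with
  | none => (st.1 ++ [p], some p.1)
  | some li => if p.1 - li ≥ min_increment then (st.1 ++ [p], some p.1) else st

def get_baseline_ant1_ticks_py_alt (baseline_ticks : List (Int × String)) : List (Int × String) :=
  let candidates := (baseline_ticks.foldl pvBCandStep ([], none)).1
  let min_increment : Int := max ((baseline_ticks.length : Int) / 50) 1
  (candidates.foldl (pvBSelStep min_increment) ([], none)).1

-- ===== PRECONDITION & SPEC =====
def Spec_get_baseline_ant1_ticks_py (baseline_ticks : List (Int × String)) (out : List (Int × String)) : Prop := out = get_baseline_ant1_ticks_py_alt baseline_ticks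
instance (baseline_ticks : List (Int × String)) (out : List (Int × String)) : Decidable (Spec_get_baseline_ant1_ticks_py baseline_ticks out) := by unfold Spec_get_baseline_ant1_ticks_py; infer_instance

-- ===== CLAIM (what is proved, stated in full; the proofs are below) =====
def Claim_equal_get_baseline_ant1_ticks_py : Prop := ∀ (baseline_ticks : List (Int × String)), Dom_get_baseline_ant1_ticks_py baseline_ticks → Spec_get_baseline_ant1_ticks_py baseline_ticks (get_baseline_ant1_ticks_py baseline_ticks)

-- ===== LEMMAS AND PROOFS =====

-- abstract characterisations of the two passes
def candSpec : List (Int × String) → Option String → List (Int × String)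
  | [], _ => []
  | p :: rest, prev =>
      let a := pvAnt1 p.2
      if some a ≠ prev then (p.1, a) :: candSpec rest (some a) else candSpec rest prev

def greedySpec (m : Int) : List (Int × String) → Option Int → List (Int × String)
  | [], _ => []
  | p :: rest, none => p :: greedySpec m rest (some p.1)
  | p :: rest, some li =>
      if p.1 - li ≥ m then p :: greedySpec m rest (some p.1) else greedySpec m rest (some li)

theorem foldlA_eq (m : Int) :
    ∀ (xs : List (Int × String)) (acc : List (Int × String)) (la : Option String) (li : Option Int),
      (xs.foldl (pvAStep m) (acc, la, li)).1 = acc ++ greedySpec m (candSpec xs la) li := by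
  intro xs
  induction xs with
  | nil => intro acc la li; simp [candSpec, greedySpec]
  | cons p rest ih =>
    intro acc la li
    simp only [List.foldl_cons, pvAStep, candSpec]
    by_cases h : some (pvAnt1 p.2) = la
    · simp only [h]; simpa using ih acc la li
    · cases li with
      | none => simp [h, ih, greedySpec]
      | some l =>
        by_cases hm : p.1 - l ≥ m
        · simp [h, hm, ih, greedySpec]
        · simp [h, hm, ih, greedySpec]

theorem foldlC_eq :
    ∀ (xs : List (Int × String)) (acc : List (Int × String)) (prev : Option String),
      (xs.foldl pvBCandStep (acc, prev)).1 = acc ++ candSpec xs prev := by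
  intro xs
  induction xs with
  | nil => intro acc prev; simp [candSpec]
  | cons p rest ih =>
    intro acc prev
    simp only [List.foldl_cons, pvBCandStep, candSpec]
    by_cases h : some (pvAnt1 p.2) = prev
    · simp only [h]; simpa using ih acc prev
    · simp [h, ih]

theorem foldlS_eq (m : Int) :
    ∀ (cs : List (Int × String)) (acc : List (Int × String)) (li : Option Int),
      (cs.foldl (pvBSelStep m) (acc, li)).1 = acc ++ greedySpec m cs li := by
  intro cs
  induction cs with
  | nil => intro acc li; simp [greedySpec]
  | cons p rest ih =>
    intro acc li
    cases li with
    | none => simp [List.foldl_cons, pvBSelStep, greedySpec, ih]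
    | some l =>
      by_cases hm : p.1 - l ≥ m
      · simp [List.foldl_cons, pvBSelStep, greedySpec, hm, ih]
      · simp [List.foldl_cons, pvBSelStep, greedySpec, hm, ih]

-- ===== VERDICT (by name: the statement is the Claim_ definition above) =====
theorem get_baseline_ant1_ticks_py_spec : Claim_equal_get_baseline_ant1_ticks_py := by
  intro bt _
  show get_baseline_ant1_ticks_py bt = get_baseline_ant1_ticks_py_alt bt
  unfold get_baseline_ant1_ticks_py get_baseline_ant1_ticks_py_alt
  rw [foldlA_eq, foldlC_eq, foldlS_eq]
  simp
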